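-- pv_equiv track=rewrite | github.com/Shadowz-git/fondamenti1 | eseDomjudge/r6.py | ricorsivaL
-- ===== SOURCE A (Python) =====
-- def sommaRigaDaColonna(mat, r, c):
--     somma = 0
--     for i in range(c, len(mat[r])):
--         somma += mat[r][i]
--
--     return somma
--
-- def sommaColonnaDaRiga(mat, c, r):
--     somma = 0
--     for i in range(r, -1, -1):
--         somma += mat[i][c]
--
--     return somma
--
-- def ricorsivaL(mat, r, c):
--     if c >= len(mat[0]) or r < 0:
--         return "SI"
--     sommaR = sommaRigaDaColonna(mat, r, c)
--     sommaC = sommaColonnaDaRiga(mat, c, r)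
--     somma = sommaR + sommaC - mat[r][c]
--     if somma % mat[r][c] == 0:
--         return ricorsivaL(mat, r-1, c + 1)
-- ===== SOURCE B (Python) =====
-- def ricorsivaL(mat, r, c):
--     ncols = len(mat[0])
--     steps = min(r + 1, ncols - c)
--     ok = all(
--         (sum(mat[r - k][c + k:])
--          + sum(mat[i][c + k] for i in range(r - k + 1))
--          - mat[r - k][c + k]) % mat[r - k][c + k] == 0
--         for k in range(steps)
--     )
--     return "SI" if ok else None
-- ===== Notes on version B (the rewrite author's own statement) =====
-- stated objective: alternative
-- what changed: A's recursion with two hand-written summing loops per call is replaced by a closed-form step count min(r+1, ncols-c) and a single short-circuiting all() over per-step hook sums built from a slice and a comprehension; total work is the same asymptotically.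
-- outside the precondition, e.g. on ricorsivaL([[1, 2]], 0, -1): A returns None, B returns 'SI'; on ricorsivaL([[1, 1]], 0, -1): A returns 'SI', B returns 'SI'
import Mathlib
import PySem

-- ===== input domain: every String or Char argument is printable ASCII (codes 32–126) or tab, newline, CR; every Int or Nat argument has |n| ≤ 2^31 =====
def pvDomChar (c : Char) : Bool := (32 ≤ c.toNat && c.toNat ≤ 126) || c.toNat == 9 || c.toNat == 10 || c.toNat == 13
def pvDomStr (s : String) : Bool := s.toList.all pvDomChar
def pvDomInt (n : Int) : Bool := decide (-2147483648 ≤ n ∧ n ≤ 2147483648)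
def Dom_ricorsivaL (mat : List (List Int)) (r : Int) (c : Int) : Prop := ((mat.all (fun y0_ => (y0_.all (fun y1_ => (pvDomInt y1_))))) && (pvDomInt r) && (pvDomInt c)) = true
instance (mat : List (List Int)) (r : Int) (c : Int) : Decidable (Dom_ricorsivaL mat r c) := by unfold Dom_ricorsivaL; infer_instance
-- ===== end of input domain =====

-- B replaces A's recursion-with-per-call-summing-loops by a closed-form step count and a
-- single short-circuiting all() over the diagonal hook checks (objective: alternative; same cost).

-- ===== PORT A =====
def sommaRigaDaColonna (mat : List (List Int)) (r : Int) (c : Int) : Int :=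
  (PySem.List.pyRange c (((PySem.List.pyGetD mat r []).length : Int)) 1).foldl
    (fun somma i => somma + PySem.List.pyGetD (PySem.List.pyGetD mat r []) i 0) 0

def sommaColonnaDaRiga (mat : List (List Int)) (c : Int) (r : Int) : Int :=
  (PySem.List.pyRange r (-1) (-1)).foldl
    (fun somma i => somma + PySem.List.pyGetD (PySem.List.pyGetD mat i []) c 0) 0

def ricorsivaL (mat : List (List Int)) (r : Int) (c : Int) : Option String :=
  if h : c ≥ ((PySem.List.pyGetD mat 0 []).length : Int) ∨ r < 0 then some "SI"
  else
    let sommaR := sommaRigaDaColonna mat r c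
    let sommaC := sommaColonnaDaRiga mat c r
    let somma := sommaR + sommaC - PySem.List.pyGetD (PySem.List.pyGetD mat r []) c 0
    if PySem.Int.mod somma (PySem.List.pyGetD (PySem.List.pyGetD mat r []) c 0) = 0 then
      ricorsivaL mat (r - 1) (c + 1)
    else none
termination_by (((PySem.List.pyGetD mat 0 []).length : Int) - c).toNat
decreasing_by omega

-- ===== PORT B =====
def ricorsivaL_alt (mat : List (List Int)) (r : Int) (c : Int) : Option String :=
  let ncols : Int := ((PySem.List.pyGetD mat 0 []).length : Int)
  let steps : Int := min (r + 1) (ncols - c)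
  let ok := (List.range steps.toNat).all (fun k =>
    decide (PySem.Int.mod
      ((PySem.List.slice (PySem.List.pyGetD mat (r - (k : Int)) []) (some (c + (k : Int))) none).sum
        + ((PySem.List.pyRange 0 (r - (k : Int) + 1) 1).map
            (fun i => PySem.List.pyGetD (PySem.List.pyGetD mat i []) (c + (k : Int)) 0)).sum
        - PySem.List.pyGetD (PySem.List.pyGetD mat (r - (k : Int)) []) (c + (k : Int)) 0)
      (PySem.List.pyGetD (PySem.List.pyGetD mat (r - (k : Int)) []) (c + (k : Int)) 0) = 0))
  if ok then some "SI" else none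

-- ===== PRECONDITION & SPEC =====

-- helpers naming the cells A touches at diagonal step k: the accesses are in range and the
-- pivot is nonzero (preSafe), and the step's hook sum is divisible by its pivot (preStep)
def prePivot (mat : List (List Int)) (r : Int) (c : Int) (k : Nat) : Int :=
  (mat.getD (r - (k : Int)).toNat []).getD (c + (k : Int)).toNat 0

def preSafe (mat : List (List Int)) (r : Int) (c : Int) (k : Nat) : Bool :=
  ((List.range mat.length).all (fun i =>
      !((i : Int) ≤ r - (k : Int)) || (c + (k : Int) < ((mat.getD i []).length : Int)))) &&
  (prePivot mat r c k != 0)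

def preStep (mat : List (List Int)) (r : Int) (c : Int) (k : Nat) : Bool :=
  preSafe mat r c k &&
  ((((mat.getD (r - (k : Int)).toNat []).drop (c + (k : Int)).toNat).sum
    + ((List.range mat.length).map
        (fun (i : Nat) => if (i : Int) ≤ r - (k : Int) then (mat.getD i []).getD (c + (k : Int)).toNat 0 else 0)).sum
    - prePivot mat r c k) % prePivot mat r c k == 0)

-- Pre_ excludes exactly the inputs on which Python A raises (empty matrix; row index out of
-- range; a too-short row or a zero pivot at a diagonal step A ACTUALLY reaches — each per-step
-- clause is guarded by the divisibility of all earlier steps, so inputs where A stops early and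
-- returns None stay inside), and negative start columns when the body runs, which are outside
-- the function's natural domain (A's range-based row sum wraps around and double-counts there).
def Pre_ricorsivaL (mat : List (List Int)) (r : Int) (c : Int) : Prop :=
  mat ≠ [] ∧
  (0 ≤ r ∧ c < ((mat.getD 0 []).length : Int) →
    0 ≤ c ∧ r < (mat.length : Int) ∧
    ∀ k ∈ List.range (mat.getD 0 []).length,
      (k : Int) < min (r + 1) (((mat.getD 0 []).length : Int) - c) →
      (∀ j ∈ List.range k, preStep mat r c j = true) → preSafe mat r c k = true)

instance (mat : List (List Int)) (r : Int) (c : Int) : Decidable (Pre_ricorsivaL mat r c) := by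
  unfold Pre_ricorsivaL; infer_instance

def pvWitness_ricorsivaL : List (List Int) × Int × Int := ([[2, 1], [1, 1]], 1, 0)

def Spec_ricorsivaL (mat : List (List Int)) (r : Int) (c : Int) (out : Option String) : Prop := out = ricorsivaL_alt mat r c
instance (mat : List (List Int)) (r : Int) (c : Int) (out : Option String) : Decidable (Spec_ricorsivaL mat r c out) := by unfold Spec_ricorsivaL; infer_instance

-- ===== CLAIM (what is proved, stated in full; the proofs are below) =====
def Claim_equal_ricorsivaL : Prop := ∀ (mat : List (List Int)) (r : Int) (c : Int), Dom_ricorsivaL mat r c → Pre_ricorsivaL mat r c → Spec_ricorsivaL mat r c (ricorsivaL mat r c)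

-- ===== LEMMAS AND PROOFS =====

-- A's row-summing loop equals B's slice sum (needs 0 ≤ c: Python's range loop would wrap
-- negative indices where the slice would not).
lemma rowsum_eq (mat : List (List Int)) (r c : Int) (hc : 0 ≤ c) :
    sommaRigaDaColonna mat r c =
      (PySem.List.slice (PySem.List.pyGetD mat r []) (some c) none).sum := by
  unfold sommaRigaDaColonna
  rw [PySem.List.foldl_pyRange_pyGetD' (PySem.List.pyGetD mat r []) 0
       (fun somma x => somma + x) 0 hc,
     PySem.List.slice_from _ hc, List.sum_eq_foldl]

-- A's downward column loop equals B's upward comprehension sum.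
lemma colsum_eq (mat : List (List Int)) (c r : Int) :
    sommaColonnaDaRiga mat c r =
      ((PySem.List.pyRange 0 (r + 1) 1).map
        (fun i => PySem.List.pyGetD (PySem.List.pyGetD mat i []) c 0)).sum := by
  unfold sommaColonnaDaRiga
  rw [PySem.List.pyRange_neg_one_eq_reverse,
      PySem.List.foldl_add, List.map_reverse, List.sum_reverse]
  norm_num

-- the per-step check of B, named for the proofs below
def pvCheck (mat : List (List Int)) (r c : Int) (k : Nat) : Bool :=
  decide (PySem.Int.mod
      ((PySem.List.slice (PySem.List.pyGetD mat (r - (k : Int)) []) (some (c + (k : Int))) none).sum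
        + ((PySem.List.pyRange 0 (r - (k : Int) + 1) 1).map
            (fun i => PySem.List.pyGetD (PySem.List.pyGetD mat i []) (c + (k : Int)) 0)).sum
        - PySem.List.pyGetD (PySem.List.pyGetD mat (r - (k : Int)) []) (c + (k : Int)) 0)
      (PySem.List.pyGetD (PySem.List.pyGetD mat (r - (k : Int)) []) (c + (k : Int)) 0) = 0)

lemma alt_eq_check (mat : List (List Int)) (r c : Int) :
    ricorsivaL_alt mat r c =
      if (List.range (min (r + 1) (((PySem.List.pyGetD mat 0 []).length : Int) - c)).toNat).all
           (pvCheck mat r c) then some "SI" else none := rfl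

lemma check_shift (mat : List (List Int)) (r c : Int) (k : Nat) :
    pvCheck mat r c (k + 1) = pvCheck mat (r - 1) (c + 1) k := by
  simp only [pvCheck]
  have h1 : r - ((k : Int) + 1) = r - 1 - (k : Int) := by ring
  have h2 : c + ((k : Int) + 1) = c + 1 + (k : Int) := by ring
  push_cast
  rw [h1, h2]

lemma key (mat : List (List Int)) :
    ∀ n (r c : Int),
      (0 ≤ r → c < ((PySem.List.pyGetD mat 0 []).length : Int) → 0 ≤ c) →
      n = (min (r + 1) (((PySem.List.pyGetD mat 0 []).length : Int) - c)).toNat →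
      ricorsivaL mat r c = ricorsivaL_alt mat r c := by
  intro n
  induction n with
  | zero =>
    intro r c _ hn
    have hcond : c ≥ ((PySem.List.pyGetD mat 0 []).length : Int) ∨ r < 0 := by omega
    rw [ricorsivaL, dif_pos hcond, alt_eq_check, ← hn]
    simp
  | succ m ih =>
    intro r c hc hn
    have hcond : ¬ (c ≥ ((PySem.List.pyGetD mat 0 []).length : Int) ∨ r < 0) := by omega
    have hc0 : 0 ≤ c := hc (by omega) (by omega)
    rw [ricorsivaL, dif_neg hcond, alt_eq_check, ← hn]
    rw [List.range_succ_eq_map, List.all_cons, List.all_map]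
    have hfirst : pvCheck mat r c 0 =
        decide (PySem.Int.mod
          (sommaRigaDaColonna mat r c + sommaColonnaDaRiga mat c r
            - PySem.List.pyGetD (PySem.List.pyGetD mat r []) c 0)
          (PySem.List.pyGetD (PySem.List.pyGetD mat r []) c 0) = 0) := by
      simp only [pvCheck, Nat.cast_zero, sub_zero, add_zero,
        rowsum_eq mat r c hc0, colsum_eq mat c r]
    have hshift : (List.range m).all (pvCheck mat r c ∘ Nat.succ)
        = (List.range m).all (pvCheck mat (r - 1) (c + 1)) := by
      simp only [Function.comp_def, Nat.succ_eq_add_one, check_shift]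
    rw [hfirst, hshift]
    by_cases hdiv : PySem.Int.mod
        (sommaRigaDaColonna mat r c + sommaColonnaDaRiga mat c r
          - PySem.List.pyGetD (PySem.List.pyGetD mat r []) c 0)
        (PySem.List.pyGetD (PySem.List.pyGetD mat r []) c 0) = 0
    · simp only [hdiv, if_pos, decide_true, Bool.true_and]
      rw [ih (r - 1) (c + 1) (fun _ _ => by omega) (by omega), alt_eq_check]
      have hm : (min (r - 1 + 1) (((PySem.List.pyGetD mat 0 []).length : Int) - (c + 1))).toNat = m := by omega
      rw [hm]
    · simp [hdiv]

-- ===== VERDICT (by name: the statement is the Claim_ definition above) =====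
theorem ricorsivaL_spec : Claim_equal_ricorsivaL := by
  intro mat r c _ hpre
  unfold Spec_ricorsivaL
  have hpg : PySem.List.pyGetD mat 0 [] = mat.getD 0 [] := PySem.List.pyGetD_zero mat []
  refine (key mat (min (r + 1) (((PySem.List.pyGetD mat 0 []).length : Int) - c)).toNat r c
    ?_ rfl).symm ▸ rfl
  intro hr hcL
  exact (hpre.2 ⟨hr, by rw [hpg] at hcL; exact hcL⟩).1
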